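-- pv_equiv track=rewrite | github.com/KangKyuC/Code-Test-Study | insights/최희범/엘리스 교재/[실습5] 메모장.py | notepad
-- ===== SOURCE A (Python) =====
-- def notepad(s, commands) :
--     left = list(s)
--     right = []
--
--     for line in commands:
--         commands = line.split()
--
--         action = commands[0]
--
--         if action == "L" :
--             if len(left) > 0 :
--                 v = left.pop()
--                 right.append(v)
--         elif action == "R" :
--             if len(right) > 0 :
--                 v = right.pop()
--                 left.append(v)
--         elif action == "D":
--             if len(left) > 0:
--                 left.pop()
--         elif action == "P" :
--             left.append(commands[1])
--
--     result = left + right[::-1]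
--
--
--     return "".join(result)
-- ===== SOURCE B (Python) =====
-- def notepad(s, commands):
--     buf = list(s)
--     cur = len(buf)
--     for line in commands:
--         parts = line.split()
--         op = parts[0]
--         if op == "P":
--             buf = buf[:cur] + [parts[1]] + buf[cur:]
--             cur += 1
--         elif op == "D" and cur > 0:
--             buf = buf[:cur - 1] + buf[cur:]
--             cur -= 1
--         elif op == "L" and cur > 0:
--             cur -= 1
--         elif op == "R" and cur < len(buf):
--             cur += 1
--     return "".join(buf)
-- ===== Notes on version B (the rewrite author's own statement) =====
-- stated objective: simpler
-- what changed: B replaces A's two stacks (left/right, with elements physically moved between them on every cursor move) by one immutable buffer plus an integer cursor: L/R only change the cursor, D and P rebuild the buffer by slicing around the cursor, so no data moves on cursor motion and the final join needs no reversal.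
import Mathlib
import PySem

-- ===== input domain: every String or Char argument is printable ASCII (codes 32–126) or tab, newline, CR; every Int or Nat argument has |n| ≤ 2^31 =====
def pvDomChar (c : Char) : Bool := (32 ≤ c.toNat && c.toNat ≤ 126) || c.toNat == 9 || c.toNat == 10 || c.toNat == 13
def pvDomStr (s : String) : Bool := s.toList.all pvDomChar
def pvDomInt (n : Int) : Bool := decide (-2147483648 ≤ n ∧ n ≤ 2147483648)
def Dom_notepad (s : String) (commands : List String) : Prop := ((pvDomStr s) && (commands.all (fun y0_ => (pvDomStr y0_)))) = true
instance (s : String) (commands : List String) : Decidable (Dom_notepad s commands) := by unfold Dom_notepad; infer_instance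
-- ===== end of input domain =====

-- B keeps one immutable buffer plus an integer cursor (slicing around the cursor) instead of
-- A's two stacks that move elements on every cursor move (objective: simpler).

-- ===== PORT A =====
-- state: (left, right), both stacks of (possibly multi-char) strings, exactly as A
def notepadStepA (st : List String × List String) (line : String) : List String × List String :=
  match PySem.Str.split₀ line with
  | [] => st  -- Python: commands[0] raises IndexError here; excluded by Pre_notepad
  | action :: rest =>
    if action = "L" then
      if st.1.length > 0 then (st.1.dropLast, st.2 ++ [st.1.getLast!]) else st
    else if action = "R" then
      if st.2.length > 0 then (st.1 ++ [st.2.getLast!], st.2.dropLast) else st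
    else if action = "D" then
      if st.1.length > 0 then (st.1.dropLast, st.2) else st
    else if action = "P" then
      match rest with
      | [] => st  -- Python: commands[1] raises IndexError here; excluded by Pre_notepad
      | w :: _ => (st.1 ++ [w], st.2)
    else st

def notepad (s : String) (commands : List String) : String :=
  let left := s.toList.map (fun c => String.ofList [c])   -- list(s)
  let st := commands.foldl notepadStepA (left, [])
  PySem.Str.join "" (st.1 ++ st.2.reverse)

-- ===== PORT B =====
-- straight recursion over the command list, carrying the buffer and the cursor as arguments;
-- D and P rebuild the buffer from slices (take/drop = Python buf[:i] / buf[i:])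
def notepadRun : List String → List String → Nat → List String
  | [], buf, _ => buf
  | line :: rest, buf, cur =>
    match PySem.Str.split₀ line with
    | [] => notepadRun rest buf cur   -- Python: parts[0] raises IndexError here; excluded by Pre_notepad
    | op :: args =>
      if op = "P" then
        match args with
        | [] => notepadRun rest buf cur   -- Python: parts[1] raises IndexError here; excluded by Pre_notepad
        | w :: _ => notepadRun rest (buf.take cur ++ [w] ++ buf.drop cur) (cur + 1)
      else if op = "D" ∧ cur > 0 then
        notepadRun rest (buf.take (cur - 1) ++ buf.drop cur) (cur - 1)
      else if op = "L" ∧ cur > 0 then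
        notepadRun rest buf (cur - 1)
      else if op = "R" ∧ cur < buf.length then
        notepadRun rest buf (cur + 1)
      else
        notepadRun rest buf cur

def notepad_alt (s : String) (commands : List String) : String :=
  let buf := s.toList.map (fun c => String.ofList [c])   -- list(s)
  PySem.Str.join "" (notepadRun commands buf buf.length)

-- ===== PRECONDITION & SPEC =====
-- Pre_ excludes exactly the inputs where both Pythons raise IndexError: a command line that
-- splits to nothing (whitespace-only), or a "P" line with no word after it.
def Pre_notepad (s : String) (commands : List String) : Prop :=
  ∀ line ∈ commands, PySem.Str.split₀ line ≠ [] ∧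
    ((PySem.Str.split₀ line).head? = some "P" → 2 ≤ (PySem.Str.split₀ line).length)
instance (s : String) (commands : List String) : Decidable (Pre_notepad s commands) := by
  unfold Pre_notepad; infer_instance
def pvWitness_notepad : String × List String := ("ab", ["P cd", "L", "D", "R", "R"])

def Spec_notepad (s : String) (commands : List String) (out : String) : Prop := out = notepad_alt s commands
instance (s : String) (commands : List String) (out : String) : Decidable (Spec_notepad s commands out) := by unfold Spec_notepad; infer_instance

-- ===== CLAIM (what is proved, stated in full; the proofs are below) =====
def Claim_equal_notepad : Prop := ∀ (s : String) (commands : List String), Dom_notepad s commands → Pre_notepad s commands → Spec_notepad s commands (notepad s commands)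

-- ===== LEMMAS AND PROOFS =====

theorem notepad_dropLast_concat_getLast! {l : List String} (h : l ≠ []) :
    l.dropLast ++ [l.getLast!] = l := by
  induction l with
  | nil => simp at h
  | cons x t ih =>
    cases t with
    | nil => simp [List.getLast!]
    | cons y u =>
      have := ih (by simp)
      simpa [List.getLast!, List.getLast] using this

theorem notepad_take_pred (al r : List String) :
    (al ++ r).take (al.length - 1) = al.dropLast := by
  rw [List.take_append_of_le_length (by omega), List.dropLast_eq_take]

-- simulation: running B from (left ++ reverse right, |left|) computes A's joined stacks
theorem notepad_run_sim (cmds : List String) : ∀ al ar : List String,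
    notepadRun cmds (al ++ ar.reverse) al.length =
      (cmds.foldl notepadStepA (al, ar)).1 ++ (cmds.foldl notepadStepA (al, ar)).2.reverse := by
  induction cmds with
  | nil => intro al ar; rfl
  | cons line rest ih =>
    intro al ar
    rw [List.foldl_cons]
    cases hsp : PySem.Str.split₀ line with
    | nil =>
      rw [show notepadStepA (al, ar) line = (al, ar) from by simp [notepadStepA, hsp]]
      rw [← ih al ar]
      simp [notepadRun, hsp]
    | cons op args =>
      by_cases hP : op = "P"
      · subst hP
        cases args with
        | nil =>
          rw [show notepadStepA (al, ar) line = (al, ar) from by simp [notepadStepA, hsp]]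
          rw [← ih al ar]
          simp [notepadRun, hsp]
        | cons w t =>
          rw [show notepadStepA (al, ar) line = (al ++ [w], ar) from by simp [notepadStepA, hsp]]
          rw [← ih (al ++ [w]) ar]
          simp [notepadRun, hsp]
      · by_cases hD : op = "D"
        · subst hD
          by_cases ha : al.length > 0
          · rw [show notepadStepA (al, ar) line = (al.dropLast, ar) from by
              simp [notepadStepA, hsp, ha]]
            rw [← ih al.dropLast ar]
            simp [notepadRun, hsp, ha, notepad_take_pred]
          · rw [show notepadStepA (al, ar) line = (al, ar) from by simp [notepadStepA, hsp, ha]]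
            rw [← ih al ar]
            simp [notepadRun, hsp, ha]
        · by_cases hL : op = "L"
          · subst hL
            by_cases ha : al.length > 0
            · have hne : al ≠ [] := by cases al <;> simp_all
              rw [show notepadStepA (al, ar) line = (al.dropLast, ar ++ [al.getLast!]) from by
                simp [notepadStepA, hsp, ha]]
              rw [← ih al.dropLast (ar ++ [al.getLast!])]
              have hbuf : al ++ ar.reverse = al.dropLast ++ (ar ++ [al.getLast!]).reverse := by
                conv_lhs => rw [← notepad_dropLast_concat_getLast! hne]
                simp
              rw [hbuf]
              simp [notepadRun, hsp, ha]
            · rw [show notepadStepA (al, ar) line = (al, ar) from by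
                simp [notepadStepA, hsp, ha]]
              rw [← ih al ar]
              simp [notepadRun, hsp, ha]
          · by_cases hR : op = "R"
            · subst hR
              by_cases hr : ar.length > 0
              · have hne : ar ≠ [] := by cases ar <;> simp_all
                have hlt : al.length < (al ++ ar.reverse).length := by
                  simp only [List.length_append, List.length_reverse]; omega
                rw [show notepadStepA (al, ar) line = (al ++ [ar.getLast!], ar.dropLast) from by
                  simp [notepadStepA, hsp, hr]]
                rw [← ih (al ++ [ar.getLast!]) ar.dropLast]
                have hbuf : al ++ ar.reverse = (al ++ [ar.getLast!]) ++ ar.dropLast.reverse := by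
                  conv_lhs =>
                    rw [show ar = ar.dropLast ++ [ar.getLast!] from
                      (notepad_dropLast_concat_getLast! hne).symm]
                  simp
                rw [hbuf]
                simp [notepadRun, hsp]
              · have hnlt : ¬ al.length < (al ++ ar.reverse).length := by
                  simp only [List.length_append, List.length_reverse]; omega
                rw [show notepadStepA (al, ar) line = (al, ar) from by
                  simp [notepadStepA, hsp, hr]]
                rw [← ih al ar]
                simp [notepadRun, hsp, hr]
            · rw [show notepadStepA (al, ar) line = (al, ar) from by
                simp [notepadStepA, hsp, hP, hD, hL, hR]]
              rw [← ih al ar]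
              simp [notepadRun, hsp, hP, hD, hL, hR]

-- ===== VERDICT (by name: the statement is the Claim_ definition above) =====
theorem notepad_spec : Claim_equal_notepad := by
  intro s commands _ _
  show PySem.Str.join ""
      ((commands.foldl notepadStepA (s.toList.map (fun c => String.ofList [c]), [])).1 ++
        (commands.foldl notepadStepA (s.toList.map (fun c => String.ofList [c]), [])).2.reverse) =
    PySem.Str.join "" (notepadRun commands (s.toList.map (fun c => String.ofList [c]))
      (s.toList.map (fun c => String.ofList [c])).length)
  have h := notepad_run_sim commands (s.toList.map (fun c => String.ofList [c])) []
  simp only [List.reverse_nil, List.append_nil] at h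
  rw [h]
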